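-- pv_equiv track=rewrite | github.com/alex-abrehforoush/Homework | 8th sem/Compiler/2/P/1.py | getLongestPrefixMatch
-- ===== SOURCE A (Python) =====
-- import itertools
--
-- def longestCommonPrefix(a):
--     size = len(a)
--     if (size == 0):
--         return ""
--     if (size == 1):
--         return a[0]
--     a.sort()
--     end = min(len(a[0]), len(a[size - 1]))
--     i = 0
--     while (i < end and
--            a[0][i] == a[size - 1][i]):
--         i += 1
--     pre = a[0][0: i]
--     return pre
--
-- def getLongestPrefixMatch(allrhs):
--     prefixes_len = dict()
--     prefixes = dict()
--     for L in range(2, len(allrhs) + 1):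
--         for subset in itertools.combinations(allrhs, L):
--             prefixes_len[subset] = len(longestCommonPrefix(list(subset)))
--             prefixes[subset] = longestCommonPrefix(list(subset))
--     if prefixes == {}:
--         return
--     return max(prefixes_len, key=prefixes_len.get), prefixes[max(prefixes_len, key=prefixes_len.get)]
-- ===== SOURCE B (Python) =====
-- def getLongestPrefixMatch(allrhs):
--     # Pairs dominate larger subsets (any subset's common prefix is a prefix of
--     # that of any pair inside it), and in A's enumeration pairs come first,
--     # so the answer is the first pair (i < j in order) with maximal common-prefix length.
--     best = None  # (length, pair, prefix)
--     n = len(allrhs)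
--     for i in range(n):
--         x = allrhs[i]
--         for j in range(i + 1, n):
--             y = allrhs[j]
--             m = min(len(x), len(y))
--             k = 0
--             while k < m and x[k] == y[k]:
--                 k += 1
--             if best is None or k > best[0]:
--                 best = (k, (x, y), x[:k])
--     if best is None:
--         return None
--     return best[1], best[2]
-- ===== Notes on version B (the rewrite author's own statement) =====
-- stated objective: faster
-- what changed: A enumerates all 2^n subsets of size >= 2 and takes the dict-order argmax of their common-prefix lengths; B scans only the n*(n-1)/2 pairs and keeps the first pair with maximal common-prefix length, which is exact because the common prefix of any subset is a prefix of that of any pair inside it and pairs come first in A's enumeration order.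
import Mathlib
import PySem

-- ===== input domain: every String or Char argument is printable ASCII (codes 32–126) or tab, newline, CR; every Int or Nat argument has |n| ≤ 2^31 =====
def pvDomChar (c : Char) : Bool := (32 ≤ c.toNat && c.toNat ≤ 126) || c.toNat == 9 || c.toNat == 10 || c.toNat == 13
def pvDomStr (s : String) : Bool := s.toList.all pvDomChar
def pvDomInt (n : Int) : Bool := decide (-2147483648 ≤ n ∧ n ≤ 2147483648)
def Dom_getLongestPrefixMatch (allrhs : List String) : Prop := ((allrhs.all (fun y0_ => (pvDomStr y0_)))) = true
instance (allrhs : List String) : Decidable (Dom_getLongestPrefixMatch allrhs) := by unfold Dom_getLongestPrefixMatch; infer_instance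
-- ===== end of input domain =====

-- B replaces A's enumeration of all 2^n subsets by a scan of the n(n-1)/2 pairs
-- (the first pair with maximal common-prefix length is A's answer): objective 'faster'.

-- ===== PORT A =====
-- the while loop 'while (i < end and a[0][i] == a[size-1][i]): i += 1' (shared verbatim by Source B);
-- the fuel argument only makes the recursion structural, it never cuts the loop short
def pvWhileAux (x y : List Char) (m : Int) : Int → Nat → Int
  | i, 0 => i
  | i, fuel + 1 =>
    if i < m ∧ PySem.List.pyGet? x i = PySem.List.pyGet? y i then
      pvWhileAux x y m (i + 1) fuel
    else i

def pvWhile (x y : List Char) (m : Int) (i : Int) : Int :=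
  pvWhileAux x y m i (m - i).toNat

def longestCommonPrefix (a : List String) : String :=
  let size := PySem.List.len a
  if size = 0 then ""
  else if size = 1 then PySem.List.pyGetD a 0 ""
  else
    let s := PySem.List.sorted a (fun x => x) false
    let endn := min (PySem.Str.len (PySem.List.pyGetD s 0 ""))
                    (PySem.Str.len (PySem.List.pyGetD s (size - 1) ""))
    let i := pvWhile (PySem.List.pyGetD s 0 "").toList (PySem.List.pyGetD s (size - 1) "").toList endn 0
    PySem.Str.slice (PySem.List.pyGetD s 0 "") (some 0) (some i)

def getLongestPrefixMatch (allrhs : List String) : Option (List String × String) :=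
  let st :=
    (PySem.List.pyRange 2 (PySem.List.len allrhs + 1) 1).foldl (fun st L =>
      (PySem.List.combinations allrhs L.toNat).foldl
        (fun (st : PySem.Dict (List String) Int × PySem.Dict (List String) String) subset =>
          (st.1.insert subset (PySem.Str.len (longestCommonPrefix subset)),
           st.2.insert subset (longestCommonPrefix subset))) st)
      ((PySem.Dict.empty : PySem.Dict (List String) Int),
       (PySem.Dict.empty : PySem.Dict (List String) String))
  if st.2.items = [] then none
  else
    match PySem.List.max? st.1.keys (fun k => st.1.getD k 0) with
    | none => none   -- unreachable: the keys list is nonempty in this branch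
    | some k => some (k, st.2.getD k "")

-- ===== PORT B =====
def getLongestPrefixMatch_alt (allrhs : List String) : Option (List String × String) :=
  let n := PySem.List.len allrhs
  let best :=
    (PySem.List.pyRange 0 n 1).foldl (fun best i =>
      let x := PySem.List.pyGetD allrhs i ""
      (PySem.List.pyRange (i + 1) n 1).foldl (fun best j =>
        let y := PySem.List.pyGetD allrhs j ""
        let m := min (PySem.Str.len x) (PySem.Str.len y)
        let k := pvWhile x.toList y.toList m 0
        match best with
        | none => some (k, (x, y), PySem.Str.slice x none (some k))
        | some b => if b.1 < k then some (k, (x, y), PySem.Str.slice x none (some k)) else some b)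
        best) none
  match best with
  | none => none
  | some b => some ([b.2.1.1, b.2.1.2], b.2.2)

-- ===== PRECONDITION & SPEC =====
def Spec_getLongestPrefixMatch (allrhs : List String) (out : Option (List String × String)) : Prop := out = getLongestPrefixMatch_alt allrhs
instance (allrhs : List String) (out : Option (List String × String)) : Decidable (Spec_getLongestPrefixMatch allrhs out) := by unfold Spec_getLongestPrefixMatch; infer_instance

-- ===== CLAIM (what is proved, stated in full; the proofs are below) =====
def Claim_equal_getLongestPrefixMatch : Prop := ∀ (allrhs : List String), Dom_getLongestPrefixMatch allrhs → Spec_getLongestPrefixMatch allrhs (getLongestPrefixMatch allrhs)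

-- ===== LEMMAS AND PROOFS =====

-- ---- proof-side vocabulary ----

/-- length of the common prefix of two character lists -/
def lcp : List Char → List Char → Nat
  | a :: as, b :: bs => if a = b then lcp as bs + 1 else 0
  | _, _ => 0

/-- all ordered pairs (i < j) of a list, in B's scan order -/
def pvPairs : List String → List (String × String)
  | [] => []
  | x :: t => (t.map (fun y => (x, y))) ++ pvPairs t

def pvKey (p : String × String) : Int := ((lcp p.1.toList p.2.toList : Nat) : Int)

def pvPfx (p : String × String) : String := String.ofList (p.1.toList.take (lcp p.1.toList p.2.toList))

def pvOut (p : String × String) : List String × String := ([p.1, p.2], pvPfx p)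

def pvE (p : String × String) : Int × (String × String) × String := (pvKey p, p, pvPfx p)

/-- first-max fold step (definitionally the body of PySem.List.max?) -/
def pvMaxStep (key : String × String → Int) (acc : Option (String × String)) (p : String × String) : Option (String × String) :=
  match acc with
  | none => some p
  | some m => if key m < key p then some p else some m

-- ---- proved lemma library ----

theorem lcp_nil_left (b : List Char) : lcp [] b = 0 := by cases b <;> rfl
theorem lcp_nil_right (a : List Char) : lcp a [] = 0 := by cases a <;> rfl

theorem lcp_comm (a : List Char) : ∀ b, lcp a b = lcp b a := by
  induction a with
  | nil => intro b; rw [lcp_nil_left, lcp_nil_right]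
  | cons x xs ih => intro b; cases b with
    | nil => rw [lcp_nil_left, lcp_nil_right]
    | cons y ys =>
      simp only [lcp]
      rcases eq_or_ne x y with h | h
      · subst h; simp [ih ys]
      · simp [h, Ne.symm h]

theorem lcp_le_left (a : List Char) : ∀ b, lcp a b ≤ a.length := by
  induction a with
  | nil => intro b; simp [lcp_nil_left]
  | cons x xs ih => intro b; cases b with
    | nil => simp [lcp_nil_right]
    | cons y ys => simp only [lcp]; split <;> simp [Nat.succ_le_succ (ih ys)]

theorem take_lcp_eq (a : List Char) : ∀ b, a.take (lcp a b) = b.take (lcp a b) := by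
  induction a with
  | nil => intro b; simp [lcp_nil_left]
  | cons x xs ih => intro b; cases b with
    | nil => simp [lcp_nil_right]
    | cons y ys =>
      simp only [lcp]; split
      · next h => subst h; simp [List.take_succ_cons, ih ys]
      · simp

theorem le_cons_destruct (c e : Char) (a x : List Char) (h : c :: a ≤ e :: x) :
    c < e ∨ (c = e ∧ a ≤ x) := by
  rcases lt_or_eq_of_le h with hlt | heq
  · rcases List.cons_lt_cons_iff.mp hlt with h1 | ⟨h1, h2⟩
    · exact Or.inl h1
    · exact Or.inr ⟨h1, le_of_lt h2⟩
  · cases heq; exact Or.inr ⟨rfl, le_refl _⟩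

theorem not_cons_le_nil (c : Char) (a : List Char) : ¬ (c :: a ≤ ([] : List Char)) := by
  intro h
  rcases lt_or_eq_of_le h with hlt | heq
  · exact List.not_lt_nil _ hlt
  · simp at heq

theorem lcp_mono_between (a : List Char) : ∀ (b x y : List Char),
    a ≤ x → x ≤ b → a ≤ y → y ≤ b → lcp a b ≤ lcp x y := by
  induction a with
  | nil => intro b x y _ _ _ _; simp [lcp_nil_left]
  | cons c a' ih =>
    intro b x y hax hxb hay hyb
    cases b with
    | nil => simp [lcp_nil_right]
    | cons d b' =>
      simp only [lcp]
      by_cases hcd : c = d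
      · subst hcd
        cases x with
        | nil => exact absurd hax (not_cons_le_nil _ _)
        | cons e x' =>
          cases y with
          | nil => exact absurd hay (not_cons_le_nil _ _)
          | cons f y' =>
            -- heads: c ≤ e ≤ c and c ≤ f ≤ c
            rcases le_cons_destruct _ _ _ _ hax with h1 | ⟨h1, ha'x⟩
            · rcases le_cons_destruct _ _ _ _ hxb with h2 | ⟨h2, _⟩
              · exact absurd (lt_trans h1 h2) (lt_irrefl c)
              · subst h2; exact absurd h1 (lt_irrefl _)
            · subst h1
              rcases le_cons_destruct _ _ _ _ hxb with h2 | ⟨_, hx'b⟩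
              · exact absurd h2 (lt_irrefl c)
              · rcases le_cons_destruct _ _ _ _ hay with h3 | ⟨h3, ha'y⟩
                · rcases le_cons_destruct _ _ _ _ hyb with h4 | ⟨h4, _⟩
                  · exact absurd (lt_trans h3 h4) (lt_irrefl c)
                  · subst h4; exact absurd h3 (lt_irrefl _)
                · subst h3
                  rcases le_cons_destruct _ _ _ _ hyb with h4 | ⟨_, hy'b⟩
                  · exact absurd h4 (lt_irrefl c)
                  · simp only [lcp]
                    exact Nat.succ_le_succ (ih b' x' y' ha'x hx'b ha'y hy'b)
      · simp [hcd]

theorem lcp_drop_zero (x y : List Char) (i : Nat) (h : min x.length y.length ≤ i) :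
    lcp (x.drop i) (y.drop i) = 0 := by
  rcases le_or_gt x.length i with hx | hx
  · rw [List.drop_eq_nil_of_le hx]; cases y.drop i <;> rfl
  · rcases le_or_gt y.length i with hy | hy
    · rw [List.drop_eq_nil_of_le hy]; cases x.drop i <;> rfl
    · omega

theorem pvWhileAux_spec (x y : List Char) (fuel : Nat) : ∀ (i : Nat),
    (min x.length y.length - i) ≤ fuel →
    pvWhileAux x y (min (x.length : Int) (y.length : Int)) (i : Int) fuel
      = ((i + lcp (x.drop i) (y.drop i) : Nat) : Int) := by
  induction fuel with
  | zero =>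
    intro i h
    have : min x.length y.length ≤ i := by omega
    simp [pvWhileAux, lcp_drop_zero x y i this]
  | succ fuel ih =>
    intro i h
    by_cases hi : i < min x.length y.length
    · have hx : i < x.length := by omega
      have hy : i < y.length := by omega
      have hgx : PySem.List.pyGet? x (i : Int) = some x[i] := by
        rw [PySem.List.pyGet?_natCast]; exact List.getElem?_eq_getElem hx
      have hgy : PySem.List.pyGet? y (i : Int) = some y[i] := by
        rw [PySem.List.pyGet?_natCast]; exact List.getElem?_eq_getElem hy
      have hdx : x.drop i = x[i] :: x.drop (i+1) := List.drop_eq_getElem_cons hx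
      have hdy : y.drop i = y[i] :: y.drop (i+1) := List.drop_eq_getElem_cons hy
      have hlt : (i : Int) < min (x.length : Int) (y.length : Int) := by
        rw [← Nat.cast_min]; exact_mod_cast hi
      by_cases heq : x[i] = y[i]
      · have : pvWhileAux x y (min (x.length : Int) (y.length : Int)) (i : Int) (fuel+1)
            = pvWhileAux x y (min (x.length : Int) (y.length : Int)) ((i : Int) + 1) fuel := by
          simp only [pvWhileAux]
          rw [if_pos ⟨hlt, by rw [hgx, hgy, heq]⟩]
        rw [this]
        have h1 : ((i : Int) + 1) = ((i + 1 : Nat) : Int) := by push_cast; ring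
        rw [h1, ih (i+1) (by omega)]
        rw [hdx, hdy]
        simp only [lcp, if_pos heq]
        push_cast; ring
      · have : pvWhileAux x y (min (x.length : Int) (y.length : Int)) (i : Int) (fuel+1) = (i : Int) := by
          simp only [pvWhileAux]
          rw [if_neg]
          rintro ⟨-, hc⟩
          rw [hgx, hgy] at hc
          exact heq (Option.some.inj hc)
        rw [this, hdx, hdy]
        simp only [lcp, if_neg heq]
        push_cast; ring
    · have : pvWhileAux x y (min (x.length : Int) (y.length : Int)) (i : Int) (fuel+1) = (i : Int) := by
        simp only [pvWhileAux]
        rw [if_neg]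
        rintro ⟨hc, -⟩
        rw [← Nat.cast_min] at hc
        have : i < min x.length y.length := by exact_mod_cast hc
        omega
      rw [this, lcp_drop_zero x y i (by omega)]
      push_cast; ring

theorem pvWhile_eq_lcp (x y : List Char) :
    pvWhile x y (min (x.length : Int) (y.length : Int)) 0 = ((lcp x y : Nat) : Int) := by
  have h0 : (0 : Int) = ((0 : Nat) : Int) := rfl
  unfold pvWhile
  rw [h0, pvWhileAux_spec x y _ 0 (by omega)]
  simp

def maxStep {α : Type} (g : α → Int) (acc : Option α) (x : α) : Option α :=
  match acc with
  | none => some x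
  | some m => if g m < g x then some x else some m

theorem max?_eq_foldl {α : Type} (g : α → Int) (xs : List α) :
    PySem.List.max? xs g = xs.foldl (maxStep g) none := rfl

theorem foldl_max_stay {α : Type} (g : α → Int) (m : α) (l : List α)
    (h : ∀ y ∈ l, g y ≤ g m) :
    l.foldl (maxStep g) (some m) = some m := by
  induction l with
  | nil => rfl
  | cons z t ih =>
    simp only [List.foldl_cons, maxStep]
    rw [if_neg (not_lt.mpr (h z (by simp)))]
    exact ih (fun y hy => h y (by simp [hy]))

theorem foldl_max_lt {α : Type} (g : α → Int) (m : α) (l : List α)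
    (h : ∀ y ∈ l, g y < g m) : ∀ (acc : Option α),
    (acc = none ∨ ∃ b, acc = some b ∧ g b < g m) →
    (l.foldl (maxStep g) acc = none ∨ ∃ b, l.foldl (maxStep g) acc = some b ∧ g b < g m) := by
  induction l with
  | nil => intro acc hacc; exact hacc
  | cons z t ih =>
    intro acc hacc
    simp only [List.foldl_cons]
    apply ih (fun y hy => h y (by simp [hy]))
    rcases hacc with rfl | ⟨b, rfl, hb⟩
    · exact Or.inr ⟨z, rfl, h z (by simp)⟩
    · by_cases hlt : g b < g z
      · exact Or.inr ⟨z, by simp [maxStep, hlt], h z (by simp)⟩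
      · exact Or.inr ⟨b, by simp [maxStep, hlt], hb⟩

theorem max?_intro {α : Type} (g : α → Int) (l₁ l₂ : List α) (m : α)
    (h₁ : ∀ y ∈ l₁, g y < g m) (h₂ : ∀ y ∈ l₂, g y ≤ g m) :
    PySem.List.max? (l₁ ++ m :: l₂) g = some m := by
  rw [max?_eq_foldl, List.foldl_append, List.foldl_cons]
  rcases foldl_max_lt g m l₁ h₁ none (Or.inl rfl) with hn | ⟨b, hb, hblt⟩
  · rw [hn]; exact foldl_max_stay g m l₂ h₂
  · rw [hb]; simp only [maxStep, if_pos hblt]; exact foldl_max_stay g m l₂ h₂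

def MaxInv {α : Type} (g : α → Int) (acc : Option α) (l : List α) : Prop :=
  (acc = none ∧ l = []) ∨
  (∃ b l₁ l₂, acc = some b ∧ l = l₁ ++ b :: l₂ ∧ (∀ y ∈ l₁, g y < g b) ∧ (∀ y ∈ l₂, g y ≤ g b))

theorem foldl_max_inv {α : Type} (g : α → Int) (xs : List α) : ∀ (acc : Option α) (pre : List α),
    MaxInv g acc pre → MaxInv g (xs.foldl (maxStep g) acc) (pre ++ xs) := by
  induction xs with
  | nil => intro acc pre h; simpa using h
  | cons z t ih =>
    intro acc pre h
    have hsplit : pre ++ z :: t = (pre ++ [z]) ++ t := by simp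
    rw [hsplit, List.foldl_cons]
    apply ih
    rcases h with ⟨rfl, rfl⟩ | ⟨b, l₁, l₂, rfl, rfl, hl₁, hl₂⟩
    · exact Or.inr ⟨z, [], [], rfl, rfl, by simp, by simp⟩
    · by_cases hlt : g b < g z
      · refine Or.inr ⟨z, l₁ ++ b :: l₂, [], by simp [maxStep, hlt], by simp, ?_, by simp⟩
        intro y hy
        rcases List.mem_append.mp hy with hy | hy
        · exact lt_trans (hl₁ y hy) hlt
        · rcases List.mem_cons.mp hy with rfl | hy
          · exact hlt
          · exact lt_of_le_of_lt (hl₂ y hy) hlt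
      · refine Or.inr ⟨b, l₁, l₂ ++ [z], by simp [maxStep, hlt], by simp, hl₁, ?_⟩
        intro y hy
        rcases List.mem_append.mp hy with hy | hy
        · exact hl₂ y hy
        · rcases List.mem_singleton.mp hy with rfl
          exact not_lt.mp hlt

theorem max?_elim {α : Type} (g : α → Int) (xs : List α) (m : α)
    (h : PySem.List.max? xs g = some m) :
    ∃ l₁ l₂, xs = l₁ ++ m :: l₂ ∧ (∀ y ∈ l₁, g y < g m) ∧ (∀ y ∈ l₂, g y ≤ g m) := by
  have H := foldl_max_inv g xs none [] (Or.inl ⟨rfl, rfl⟩)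
  rw [max?_eq_foldl] at h
  rw [h] at H
  rcases H with ⟨hn, -⟩ | ⟨b, l₁, l₂, hb, hl, h1, h2⟩
  · exact absurd hn (by simp)
  · rcases Option.some.inj hb with rfl
    exact ⟨l₁, l₂, by simpa using hl, h1, h2⟩

theorem foldl_max_congr {α : Type} (g g' : α → Int) (xs : List α)
    (h : ∀ x ∈ xs, g x = g' x) : ∀ (acc : Option α), (∀ b, acc = some b → g b = g' b) →
    xs.foldl (maxStep g) acc = xs.foldl (maxStep g') acc := by
  induction xs with
  | nil => intro acc _; rfl
  | cons z t ih =>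
    intro acc hacc
    simp only [List.foldl_cons]
    have hz := h z (by simp)
    have ht : ∀ x ∈ t, g x = g' x := fun x hx => h x (by simp [hx])
    cases acc with
    | none =>
      simp only [maxStep]
      exact ih ht (some z) (fun b hb => by rcases Option.some.inj hb with rfl; exact hz)
    | some b =>
      have hb := hacc b rfl
      simp only [maxStep, hb, hz]
      split
      · exact ih ht (some z) (fun c hc => by rcases Option.some.inj hc with rfl; exact hz)
      · exact ih ht (some b) (fun c hc => by rcases Option.some.inj hc with rfl; exact hb)

theorem max?_congr_mem {α : Type} (g g' : α → Int) (xs : List α)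
    (h : ∀ x ∈ xs, g x = g' x) : PySem.List.max? xs g = PySem.List.max? xs g' := by
  rw [max?_eq_foldl, max?_eq_foldl]
  exact foldl_max_congr g g' xs h none (by simp)

theorem foldl_add_extends {α : Type} [BEq α] (l : List α) :
    ∀ (acc : List α), ∃ extra, l.foldl PySem.Set.add acc = acc ++ extra ∧ ∀ y ∈ extra, y ∈ l := by
  induction l with
  | nil => intro acc; exact ⟨[], by simp⟩
  | cons z t ih =>
    intro acc
    simp only [List.foldl_cons]
    unfold PySem.Set.add
    split
    · rcases ih acc with ⟨extra, he, hm⟩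
      exact ⟨extra, he, fun y hy => by simp [hm y hy]⟩
    · rcases ih (acc ++ [z]) with ⟨extra, he, hm⟩
      refine ⟨z :: extra, by simpa using he, ?_⟩
      intro y hy
      rcases List.mem_cons.mp hy with rfl | hy
      · simp
      · simp [hm y hy]

theorem mem_foldl_add {α : Type} [BEq α] [LawfulBEq α] (l : List α) :
    ∀ (acc : List α) (x : α), x ∈ l.foldl PySem.Set.add acc ↔ x ∈ acc ∨ x ∈ l := by
  induction l with
  | nil => intro acc x; simp
  | cons z t ih =>
    intro acc x
    simp only [List.foldl_cons]
    rw [ih]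
    unfold PySem.Set.add
    split
    · next h =>
      have hz : z ∈ acc := by simpa using h
      constructor
      · rintro (h1 | h1)
        · exact Or.inl h1
        · exact Or.inr (List.mem_cons_of_mem _ h1)
      · rintro (h1 | h1)
        · exact Or.inl h1
        · rcases List.mem_cons.mp h1 with rfl | h1
          · exact Or.inl hz
          · exact Or.inr h1
    · simp only [List.mem_append, List.mem_cons]
      tauto

theorem dedup_append_cons {α : Type} [BEq α] [LawfulBEq α] (l₁ l₂ : List α) (m : α)
    (hm : m ∉ l₁) :
    ∃ y₂, PySem.List.dedup (l₁ ++ m :: l₂) = PySem.List.dedup l₁ ++ m :: y₂ ∧ ∀ y ∈ y₂, y ∈ l₂ := by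
  unfold PySem.List.dedup PySem.Set.ofList
  rw [List.foldl_append, List.foldl_cons]
  have hD : m ∉ l₁.foldl PySem.Set.add PySem.Set.empty := by
    rw [mem_foldl_add]
    rintro (h | h)
    · exact absurd h (by simp [PySem.Set.empty])
    · exact hm h
  have hstep : PySem.Set.add (l₁.foldl PySem.Set.add PySem.Set.empty) m
      = l₁.foldl PySem.Set.add PySem.Set.empty ++ [m] := by
    unfold PySem.Set.add PySem.Set.contains
    rw [List.contains_eq_mem]
    have hfun : (fun (s : List α) (x : α) => if List.contains s x = true then s else s ++ [x]) = PySem.Set.add := rfl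
    simp only [hfun]
    rw [if_neg (by simpa using hD)]
  rw [hstep]
  rcases foldl_add_extends l₂ (l₁.foldl PySem.Set.add PySem.Set.empty ++ [m]) with ⟨extra, he, hmem⟩
  exact ⟨extra, by simpa using he, hmem⟩

theorem combos2_eq (xs : List String) :
    PySem.List.combinations xs 2 = (pvPairs xs).map (fun p => [p.1, p.2]) := by
  induction xs with
  | nil => rfl
  | cons x t ih =>
    show PySem.List.combinations (x :: t) (1 + 1) = _
    rw [PySem.List.combinations_cons_succ, PySem.List.combinations_one]
    unfold pvPairs
    rw [List.map_append, List.map_map, List.map_map, ih]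
    rfl

theorem mem_pvPairs_of_sublist (x y : String) : ∀ (xs : List String),
    [x, y].Sublist xs → (x, y) ∈ pvPairs xs := by
  intro xs
  induction xs with
  | nil => intro h; simp at h
  | cons z t ih =>
    intro h
    unfold pvPairs
    cases h with
    | cons l h' => exact List.mem_append_right _ (ih h')
    | cons₂ l h' =>
      apply List.mem_append_left
      exact List.mem_map.mpr ⟨y, h'.subset (by simp), rfl⟩

theorem dict_fold_get? {ν : Type} (f : List String → ν) : ∀ (l : List (List String))
    (d : PySem.Dict (List String) ν) (k : List String),
    ((l.foldl (fun d s => d.insert s (f s)) d)).get? k = if k ∈ l then some (f k) else d.get? k := by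
  intro l
  induction l with
  | nil => intro d k; simp
  | cons s t ih =>
    intro d k
    rw [List.foldl_cons, ih]
    by_cases hk : k ∈ t
    · simp [hk]
    · simp only [hk, if_false, List.mem_cons]
      by_cases hks : k = s
      · subst hks
        simp [PySem.Dict.get?_insert_self]
      · simp [PySem.Dict.get?_insert, hks]

theorem str_take_ofList (u : String) (k : Nat) :
    PySem.Str.slice u (some 0) (some (k : Int)) = String.ofList (u.toList.take k) := by
  have h : (PySem.Str.slice u (some 0) (some (k : Int))).toList = u.toList.take k := by
    rw [PySem.Str.toList_slice, PySem.Chars.slice_eq_listSlice]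
    rw [PySem.List.slice_zero_start, PySem.List.slice_to_natCast]
  have h2 := congrArg String.ofList h
  rwa [String.ofList_toList] at h2

theorem lCP_spec (a : List String) (h2 : 2 ≤ a.length) :
    ∃ u v : String, u ∈ a ∧ v ∈ a ∧ (∀ w ∈ a, u ≤ w ∧ w ≤ v) ∧
      longestCommonPrefix a = String.ofList (u.toList.take (lcp u.toList v.toList)) := by
  set s := PySem.List.sorted a (fun x => x) false with hs
  have hperm : s.Perm a := PySem.List.sorted_perm a _ _
  have hlen : s.length = a.length := hperm.length_eq
  have h0 : 0 < s.length := by omega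
  have hN : a.length - 1 < s.length := by omega
  refine ⟨s[0], s[a.length - 1], ?_, ?_, ?_, ?_⟩
  · exact hperm.subset (List.getElem_mem h0)
  · exact hperm.subset (List.getElem_mem hN)
  · intro w hw
    obtain ⟨i, hi, hiw⟩ := List.mem_iff_getElem.mp (hperm.mem_iff.mpr hw)
    constructor
    · rw [← hiw]; exact PySem.List.sorted_id_getElem_mono a (Nat.zero_le i) hi
    · rw [← hiw]; exact PySem.List.sorted_id_getElem_mono a (by omega) hN
  · unfold longestCommonPrefix
    rw [if_neg (by rw [PySem.List.len_eq]; omega), if_neg (by rw [PySem.List.len_eq]; omega)]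
    simp only [← hs, PySem.List.len_eq]
    have hg0 : PySem.List.pyGetD s (0 : Int) "" = s[0] := by
      rw [PySem.List.pyGetD_eq_getElem s "" (by omega) (by exact_mod_cast h0)]
      norm_num
    have hgN : PySem.List.pyGetD s ((a.length : Int) - 1) "" = s[a.length - 1] := by
      rw [PySem.List.pyGetD_eq_getElem s "" (by omega) (by rw [hlen]; omega)]
      congr 1
      omega
    rw [hg0, hgN]
    have hmin : min (PySem.Str.len s[0]) (PySem.Str.len s[a.length - 1])
        = min ((s[0].toList.length : Int)) ((s[a.length - 1].toList.length : Int)) := rfl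
    rw [hmin, pvWhile_eq_lcp]
    exact str_take_ofList _ _

theorem lCP_pair (x y : String) : longestCommonPrefix [x, y] = pvPfx (x, y) := by
  obtain ⟨u, v, hu, hv, hbnd, heq⟩ := lCP_spec [x, y] (by simp)
  have hxb := hbnd x (by simp)
  have hyb := hbnd y (by simp)
  unfold pvPfx
  rw [heq]
  have hcase : (u = x ∨ u = y) ∧ (v = x ∨ v = y) := by
    constructor
    · simpa using hu
    · simpa using hv
  rcases hcase with ⟨hu', hv'⟩
  have htake : u.toList.take (lcp u.toList v.toList) = x.toList.take (lcp x.toList y.toList) := by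
    rcases hu' with h1 | h1 <;> rcases hv' with h2 | h2
    · -- u = x, v = x : then y = x
      have hxy : y = x := le_antisymm (h2 ▸ hyb.2) (h1 ▸ hyb.1)
      rw [h1, h2, hxy]
    · rw [h1, h2]
    · -- u = y, v = x
      rw [h1, h2, lcp_comm]
      exact (take_lcp_eq _ _).symm
    · -- u = y, v = y : then x = y
      have hxy : x = y := le_antisymm (h2 ▸ hxb.2) (h1 ▸ hxb.1)
      rw [h1, h2, hxy]
  rw [htake]

theorem lCP_len (s : List String) (u v : String)
    (heq : longestCommonPrefix s = String.ofList (u.toList.take (lcp u.toList v.toList))) :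
    PySem.Str.len (longestCommonPrefix s) = ((lcp u.toList v.toList : Nat) : Int) := by
  rw [heq]
  show ((String.ofList (u.toList.take (lcp u.toList v.toList))).toList.length : Int) = _
  rw [String.toList_ofList, List.length_take]
  congr 1
  exact Nat.min_eq_left (lcp_le_left _ _)

theorem lCP_len_le (s : List String) (h2 : 2 ≤ s.length) (x y : String)
    (hx : x ∈ s) (hy : y ∈ s) :
    PySem.Str.len (longestCommonPrefix s) ≤ pvKey (x, y) := by
  obtain ⟨u, v, hu, hv, hbnd, heq⟩ := lCP_spec s h2
  rw [lCP_len s u v heq]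
  unfold pvKey
  have := lcp_mono_between u.toList v.toList x.toList y.toList
    (String.le_iff_toList_le.mp (hbnd x hx).1) (String.le_iff_toList_le.mp (hbnd x hx).2)
    (String.le_iff_toList_le.mp (hbnd y hy).1) (String.le_iff_toList_le.mp (hbnd y hy).2)
  exact_mod_cast this

theorem lCP_len_pair (x y : String) :
    PySem.Str.len (longestCommonPrefix [x, y]) = pvKey (x, y) := by
  rw [lCP_pair]
  unfold pvPfx pvKey
  show ((String.ofList (x.toList.take (lcp x.toList y.toList))).toList.length : Int) = _
  rw [String.toList_ofList, List.length_take]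
  congr 1
  exact Nat.min_eq_left (lcp_le_left _ _)

-- ---- A characterised ----

-- the flattened list of all enumerated subsets, in A's insertion order
def allSubs (allrhs : List String) : List (List String) :=
  (PySem.List.pyRange 2 (PySem.List.len allrhs + 1) 1).flatMap
    (fun L => PySem.List.combinations allrhs L.toNat)

theorem stA_eq (allrhs : List String) :
    (PySem.List.pyRange 2 (PySem.List.len allrhs + 1) 1).foldl (fun st L =>
      (PySem.List.combinations allrhs L.toNat).foldl
        (fun (st : PySem.Dict (List String) Int × PySem.Dict (List String) String) subset =>
          (st.1.insert subset (PySem.Str.len (longestCommonPrefix subset)),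
           st.2.insert subset (longestCommonPrefix subset))) st)
      ((PySem.Dict.empty : PySem.Dict (List String) Int),
       (PySem.Dict.empty : PySem.Dict (List String) String))
    = ((allSubs allrhs).foldl
         (fun d s => d.insert s (PySem.Str.len (longestCommonPrefix s))) PySem.Dict.empty,
       (allSubs allrhs).foldl
         (fun d s => d.insert s (longestCommonPrefix s)) PySem.Dict.empty) := by
  unfold allSubs
  rw [List.flatMap_def, List.foldl_flatten, List.foldl_flatten, List.foldl_map, List.foldl_map]
  have hsplit : ∀ (Ls : List Int)
      (st : PySem.Dict (List String) Int × PySem.Dict (List String) String),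
      Ls.foldl (fun st L =>
        (PySem.List.combinations allrhs L.toNat).foldl
          (fun (st : PySem.Dict (List String) Int × PySem.Dict (List String) String) subset =>
            (st.1.insert subset (PySem.Str.len (longestCommonPrefix subset)),
             st.2.insert subset (longestCommonPrefix subset))) st) st
      = (Ls.foldl (fun d L => (PySem.List.combinations allrhs L.toNat).foldl
           (fun d s => d.insert s (PySem.Str.len (longestCommonPrefix s))) d) st.1,
         Ls.foldl (fun d L => (PySem.List.combinations allrhs L.toNat).foldl
           (fun d s => d.insert s (longestCommonPrefix s)) d) st.2) := by
    intro Ls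
    induction Ls with
    | nil => intro st; rfl
    | cons L t iht =>
      intro st
      simp only [List.foldl_cons]
      rw [iht]
      congr 1
      all_goals {
        rw [PySem.List.foldl_prod_mk
          (fun d s => PySem.Dict.insert d s (PySem.Str.len (longestCommonPrefix s)))
          (fun d s => PySem.Dict.insert d s (longestCommonPrefix s))] }
  exact hsplit _ _

theorem dedup_eq_nil_iff {α : Type} [BEq α] [LawfulBEq α] (l : List α) :
    PySem.List.dedup l = [] ↔ l = [] := by
  constructor
  · intro h
    cases l with
    | nil => rfl
    | cons x t =>
      have : x ∈ PySem.List.dedup (x :: t) := (PySem.List.mem_dedup _ _).mpr (by simp)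
      rw [h] at this
      simp at this
  · rintro rfl; rfl

theorem keys_fold_insert_eq_dedup {ν : Type} (f : List String → ν) (l : List (List String)) :
    ((l.foldl (fun d s => d.insert s (f s)) (PySem.Dict.empty : PySem.Dict (List String) ν))).keys
      = PySem.List.dedup l := by
  rw [PySem.Dict.keys_foldl_insert l (fun _ s => f s) PySem.Dict.empty]
  rw [PySem.Dict.keys_empty]
  rfl

theorem getD_fold_insert {ν : Type} (f : List String → ν) (l : List (List String))
    (k : List String) (hk : k ∈ l) (d0 : ν) :
    ((l.foldl (fun d s => d.insert s (f s)) (PySem.Dict.empty : PySem.Dict (List String) ν))).getD k d0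
      = f k := by
  rw [PySem.Dict.getD_eq_get?_getD, dict_fold_get? f l PySem.Dict.empty k, if_pos hk]
  rfl

theorem sublist_two_of_mem_combinations (s : List String) (allrhs : List String) (L : Nat)
    (hL : 2 ≤ L) (hs : s ∈ PySem.List.combinations allrhs L) :
    ∃ x y t, s = x :: y :: t ∧ (x, y) ∈ pvPairs allrhs := by
  obtain ⟨hsub, hlen⟩ := (PySem.List.mem_combinations_iff allrhs L s).mp hs
  rcases s with _ | ⟨x, _ | ⟨y, t⟩⟩
  · simp at hlen; omega
  · simp at hlen; omega
  · refine ⟨x, y, t, rfl, ?_⟩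
    apply mem_pvPairs_of_sublist
    have h2 : [x, y].Sublist (x :: y :: t) := by
      apply List.cons_sublist_cons.mpr
      apply List.cons_sublist_cons.mpr
      exact List.nil_sublist t
    exact h2.trans hsub

theorem portA_eq (allrhs : List String) :
    getLongestPrefixMatch allrhs = (PySem.List.max? (pvPairs allrhs) pvKey).map pvOut := by
  unfold getLongestPrefixMatch
  rw [stA_eq]
  set n := allrhs.length with hn
  by_cases hn2 : 2 ≤ n
  · -- the general case: at least one pair exists
    -- allSubs = pairs-as-lists ++ rest
    have hrange : PySem.List.pyRange 2 (PySem.List.len allrhs + 1) 1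
        = 2 :: PySem.List.pyRange 3 (PySem.List.len allrhs + 1) 1 := by
      rw [PySem.List.pyRange_one_cons (by rw [PySem.List.len_eq]; omega)]
      norm_num
    have hallsubs : allSubs allrhs
        = (pvPairs allrhs).map (fun p => [p.1, p.2])
          ++ (PySem.List.pyRange 3 (PySem.List.len allrhs + 1) 1).flatMap
               (fun L => PySem.List.combinations allrhs L.toNat) := by
      unfold allSubs
      rw [hrange, List.flatMap_cons]
      congr 1
      exact combos2_eq allrhs
    -- the first maximal pair
    obtain ⟨m, hm⟩ : ∃ m, PySem.List.max? (pvPairs allrhs) pvKey = some m := by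
      rcases h : PySem.List.max? (pvPairs allrhs) pvKey with _ | m
      · exfalso
        have hP : pvPairs allrhs = [] := (PySem.List.max?_eq_none_iff _ _).mp h
        obtain ⟨x, y, t, hxy⟩ : ∃ x y t, allrhs = x :: y :: t := by
          match allrhs, hn2 with
          | x :: y :: t, _ => exact ⟨x, y, t, rfl⟩
        have : (x, y) ∈ pvPairs allrhs := by
          apply mem_pvPairs_of_sublist
          rw [hxy]
          exact List.cons_sublist_cons.mpr (List.cons_sublist_cons.mpr (List.nil_sublist t))
        rw [hP] at this
        simp at this
      · exact ⟨m, rfl⟩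
    obtain ⟨l₁, l₂, hP, h₁, h₂⟩ := max?_elim pvKey (pvPairs allrhs) m hm
    have hmax : ∀ p ∈ pvPairs allrhs, pvKey p ≤ pvKey m := PySem.List.max?_isMax hm
    -- value function of A's dicts on keys
    set g : List String → Int := fun s => PySem.Str.len (longestCommonPrefix s) with hg
    set M : List String := [m.1, m.2] with hM
    have hgM : g M = pvKey m := lCP_len_pair m.1 m.2
    -- decomposition of allSubs at M
    have hdecomp : allSubs allrhs
        = (l₁.map (fun p => [p.1, p.2]))
          ++ M :: ((l₂.map (fun p => [p.1, p.2]))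
          ++ (PySem.List.pyRange 3 (PySem.List.len allrhs + 1) 1).flatMap
               (fun L => PySem.List.combinations allrhs L.toNat)) := by
      rw [hallsubs, hP]
      simp [hM]
    have hstrict : ∀ y ∈ l₁.map (fun p => [p.1, p.2]), g y < g M := by
      intro y hy
      obtain ⟨p, hp, rfl⟩ := List.mem_map.mp hy
      rw [hgM]
      calc g [p.1, p.2] = pvKey p := lCP_len_pair p.1 p.2
        _ < pvKey m := h₁ p hp
    have hrest : ∀ y ∈ (l₂.map (fun p => [p.1, p.2]))
          ++ (PySem.List.pyRange 3 (PySem.List.len allrhs + 1) 1).flatMap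
               (fun L => PySem.List.combinations allrhs L.toNat), g y ≤ g M := by
      intro y hy
      rw [hgM]
      rcases List.mem_append.mp hy with hy | hy
      · obtain ⟨p, hp, rfl⟩ := List.mem_map.mp hy
        calc g [p.1, p.2] = pvKey p := lCP_len_pair p.1 p.2
          _ ≤ pvKey m := h₂ p hp
      · obtain ⟨L, hL, hyc⟩ := List.mem_flatMap.mp hy
        have hL3 : 3 ≤ L := ((PySem.List.mem_pyRange_one).mp hL).1
        have hL2 : 2 ≤ L.toNat := by omega
        obtain ⟨x, z, t, rfl, hxz⟩ := sublist_two_of_mem_combinations y allrhs L.toNat hL2 hyc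
        calc g (x :: z :: t) ≤ pvKey (x, z) :=
              lCP_len_le _ (by simp) x z (by simp) (by simp)
          _ ≤ pvKey m := hmax _ hxz
    have hMnotl₁ : M ∉ l₁.map (fun p => [p.1, p.2]) := by
      intro hmem
      exact absurd (hstrict M hmem) (lt_irrefl _)
    obtain ⟨y₂, hdd, hy₂⟩ := dedup_append_cons (l₁.map (fun p => [p.1, p.2]))
      ((l₂.map (fun p => [p.1, p.2]))
        ++ (PySem.List.pyRange 3 (PySem.List.len allrhs + 1) 1).flatMap
             (fun L => PySem.List.combinations allrhs L.toNat)) M hMnotl₁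
    rw [hdecomp] at *
    -- A's max? over the dict keys
    have hkeys : ((((l₁.map (fun p => [p.1, p.2]))
          ++ M :: ((l₂.map (fun p => [p.1, p.2]))
          ++ (PySem.List.pyRange 3 (PySem.List.len allrhs + 1) 1).flatMap
               (fun L => PySem.List.combinations allrhs L.toNat))).foldl
        (fun d s => d.insert s (g s)) PySem.Dict.empty)).keys
        = PySem.List.dedup ((l₁.map (fun p => [p.1, p.2]))
          ++ M :: ((l₂.map (fun p => [p.1, p.2]))
          ++ (PySem.List.pyRange 3 (PySem.List.len allrhs + 1) 1).flatMap
               (fun L => PySem.List.combinations allrhs L.toNat))) :=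
      keys_fold_insert_eq_dedup g _
    obtain ⟨m1, m2⟩ := m
    simp only [hm, Option.map_some]
    set KS : List (List String) := List.map (fun p => [p.1, p.2]) l₁ ++ M ::
      (List.map (fun p => [p.1, p.2]) l₂ ++
        List.flatMap (fun L => PySem.List.combinations allrhs L.toNat)
          (PySem.List.pyRange 3 (PySem.List.len allrhs + 1) 1)) with hKS
    have hMmem : M ∈ KS := by rw [hKS]; simp
    have hmemKS : ∀ k, k ∈ PySem.List.dedup KS → k ∈ KS :=
      fun k hk => (PySem.List.mem_dedup _ _).mp hk
    have hkeys2 : (KS.foldl (fun d s => d.insert s (longestCommonPrefix s)) PySem.Dict.empty).keys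
        = PySem.List.dedup KS := keys_fold_insert_eq_dedup _ KS
    have hksne : PySem.List.dedup KS ≠ [] := by
      rw [Ne, dedup_eq_nil_iff, hKS]
      simp
    have hitems : ¬ ((KS.foldl (fun d s => d.insert s (longestCommonPrefix s)) PySem.Dict.empty).items = []) := by
      intro h
      apply hksne
      rw [← hkeys2]
      have hk : (KS.foldl (fun d s => d.insert s (longestCommonPrefix s)) PySem.Dict.empty).keys
          = (KS.foldl (fun d s => d.insert s (longestCommonPrefix s)) PySem.Dict.empty).items.map Prod.fst := rfl
      rw [hk, h]
      rfl
    rw [if_neg hitems]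
    have hagree : ∀ k ∈ PySem.List.dedup KS,
        (KS.foldl (fun d s => d.insert s (PySem.Str.len (longestCommonPrefix s))) PySem.Dict.empty).getD k 0 = g k :=
      fun k hk => getD_fold_insert _ KS k (hmemKS k hk) 0
    have hstrict' : ∀ y ∈ PySem.List.dedup (List.map (fun p => [p.1, p.2]) l₁), g y < g M :=
      fun y hy => hstrict y ((PySem.List.mem_dedup _ _).mp hy)
    have h₂' : ∀ y ∈ y₂, g y ≤ g M := fun y hy => hrest y (hy₂ y hy)
    have hgd : PySem.List.max?
        (KS.foldl (fun d s => d.insert s (PySem.Str.len (longestCommonPrefix s))) PySem.Dict.empty).keys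
        (fun k => (KS.foldl (fun d s => d.insert s (PySem.Str.len (longestCommonPrefix s))) PySem.Dict.empty).getD k 0)
        = some M := by
      rw [hkeys]
      rw [max?_congr_mem _ g _ hagree]
      rw [hdd]
      exact max?_intro g _ y₂ M hstrict' h₂'
    rw [hgd]
    show some (M, (KS.foldl (fun d s => d.insert s (longestCommonPrefix s)) PySem.Dict.empty).getD M "")
      = some (pvOut (m1, m2))
    rw [getD_fold_insert longestCommonPrefix KS M hMmem]
    rw [hM]
    unfold pvOut
    rw [lCP_pair m1 m2]
  · -- fewer than two strings: no subsets, no pairs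
    have hrange : PySem.List.pyRange 2 (PySem.List.len allrhs + 1) 1 = [] := by
      apply PySem.List.pyRange_one_eq_nil
      rw [PySem.List.len_eq]; omega
    have hsubs : allSubs allrhs = [] := by unfold allSubs; rw [hrange]; rfl
    rw [hsubs]
    have hP : pvPairs allrhs = [] := by
      cases hcase : allrhs with
      | nil => rfl
      | cons x t =>
        cases hcase2 : t with
        | nil => rfl
        | cons y t' =>
          exfalso
          rw [hn, hcase, hcase2] at hn2
          simp at hn2
    rw [hP]
    rfl

-- ---- B characterised ----

-- B's inner-loop body, verbatim
def stepB (x y : String) (best : Option (Int × (String × String) × String)) :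
    Option (Int × (String × String) × String) :=
  let m := min (PySem.Str.len x) (PySem.Str.len y)
  let k := pvWhile x.toList y.toList m 0
  match best with
  | none => some (k, (x, y), PySem.Str.slice x none (some k))
  | some b => if b.1 < k then some (k, (x, y), PySem.Str.slice x none (some k)) else some b

def foldB (acc : Option (Int × (String × String) × String)) :
    List String → Option (Int × (String × String) × String)
  | [] => acc
  | x :: t => foldB (t.foldl (fun b y => stepB x y b) acc) t

theorem str_take_ofList' (u : String) (k : Nat) :
    PySem.Str.slice u none (some (k : Int)) = String.ofList (u.toList.take k) := by
  have h : (PySem.Str.slice u none (some (k : Int))).toList = u.toList.take k := by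
    rw [PySem.Str.toList_slice, PySem.Chars.slice_eq_listSlice, PySem.List.slice_to_natCast]
  have h2 := congrArg String.ofList h
  rwa [String.ofList_toList] at h2

theorem stepB_embed (x y : String) (b : Option (String × String)) :
    stepB x y (b.map pvE) = (maxStep pvKey b (x, y)).map pvE := by
  have hk : pvWhile x.toList y.toList (min (PySem.Str.len x) (PySem.Str.len y)) 0 = pvKey (x, y) := by
    have : min (PySem.Str.len x) (PySem.Str.len y)
        = min ((x.toList.length : Int)) ((y.toList.length : Int)) := rfl
    rw [this, pvWhile_eq_lcp]
    rfl
  have hs : PySem.Str.slice x none (some (pvKey (x, y))) = pvPfx (x, y) := by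
    unfold pvKey pvPfx
    exact str_take_ofList' x _
  cases b with
  | none =>
    simp only [stepB, maxStep, Option.map_none, hk, hs]
    rfl
  | some p =>
    simp only [stepB, maxStep, Option.map_some, hk, hs]
    show (if pvKey p < pvKey (x, y) then _ else _) = _
    split <;> rfl

theorem foldB_pairs (t : List String) : ∀ acc,
    foldB acc t = (pvPairs t).foldl (fun b p => stepB p.1 p.2 b) acc := by
  induction t with
  | nil => intro acc; rfl
  | cons x t ih =>
    intro acc
    show foldB (t.foldl (fun b y => stepB x y b) acc) t = _
    rw [ih]
    rw [show pvPairs (x :: t) = (t.map (fun y => (x, y))) ++ pvPairs t from rfl,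
      List.foldl_append, List.foldl_map]

theorem foldl_stepB_max (ps : List (String × String)) : ∀ (acc : Option (String × String)),
    ps.foldl (fun b p => stepB p.1 p.2 b) (acc.map pvE) = (ps.foldl (maxStep pvKey) acc).map pvE := by
  induction ps with
  | nil => intro acc; rfl
  | cons p t ih =>
    intro acc
    simp only [List.foldl_cons]
    rw [show stepB p.1 p.2 (acc.map pvE) = (maxStep pvKey acc (p.1, p.2)).map pvE from stepB_embed p.1 p.2 acc]
    exact ih _

theorem outer_fold_eq (allrhs : List String) : ∀ (d : Nat) (k : Nat)
    (acc : Option (Int × (String × String) × String)),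
    allrhs.length - k ≤ d → k ≤ allrhs.length →
    (PySem.List.pyRange (k : Int) (PySem.List.len allrhs) 1).foldl (fun best i =>
      (PySem.List.pyRange (i + 1) (PySem.List.len allrhs) 1).foldl (fun best j =>
        stepB (PySem.List.pyGetD allrhs i "") (PySem.List.pyGetD allrhs j "") best) best) acc
    = foldB acc (allrhs.drop k) := by
  intro d
  induction d with
  | zero =>
    intro k acc hd hk
    have hkl : k = allrhs.length := by omega
    subst hkl
    rw [PySem.List.pyRange_one_eq_nil (by rw [PySem.List.len_eq]), List.drop_length]
    rfl
  | succ d ih =>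
    intro k acc hd hk
    rcases Nat.eq_or_lt_of_le hk with hkl | hkl
    · subst hkl
      rw [PySem.List.pyRange_one_eq_nil (by rw [PySem.List.len_eq]), List.drop_length]
      rfl
    · rw [PySem.List.pyRange_one_cons (by rw [PySem.List.len_eq]; exact_mod_cast hkl), List.foldl_cons]
      have hx : PySem.List.pyGetD allrhs (k : Int) "" = allrhs[k] :=
        PySem.List.pyGetD_eq_getElem allrhs "" (by omega) (by exact_mod_cast hkl)
      have hcast : (k : Int) + 1 = ((k + 1 : Nat) : Int) := by push_cast; ring
      have hinner : ∀ acc', (PySem.List.pyRange ((k : Int) + 1) (PySem.List.len allrhs) 1).foldl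
          (fun best j => stepB (PySem.List.pyGetD allrhs (k : Int) "") (PySem.List.pyGetD allrhs j "") best) acc'
          = (allrhs.drop (k + 1)).foldl (fun b y => stepB allrhs[k] y b) acc' := by
        intro acc'
        rw [hcast, hx]
        have := PySem.List.foldl_pyRange_pyGetD allrhs ""
          (fun (b : Option (Int × (String × String) × String)) (y : String) => stepB allrhs[k] y b) acc'
          (a := ((k + 1 : Nat) : Int)) (by positivity)
        simpa using this
      rw [hinner acc, hcast, ih (k + 1) _ (by omega) (by omega)]
      have hdk : allrhs.drop k = allrhs[k] :: allrhs.drop (k + 1) :=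
        List.drop_eq_getElem_cons (by exact_mod_cast hkl)
      rw [hdk]
      rfl

theorem portB_eq (allrhs : List String) :
    getLongestPrefixMatch_alt allrhs = (PySem.List.max? (pvPairs allrhs) pvKey).map pvOut := by
  have hbest : (PySem.List.pyRange 0 (PySem.List.len allrhs) 1).foldl (fun best i =>
      (PySem.List.pyRange (i + 1) (PySem.List.len allrhs) 1).foldl (fun best j =>
        stepB (PySem.List.pyGetD allrhs i "") (PySem.List.pyGetD allrhs j "") best) best)
      (none : Option (Int × (String × String) × String))
      = (PySem.List.max? (pvPairs allrhs) pvKey).map pvE := by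
    have h0 : ((0 : Nat) : Int) = (0 : Int) := rfl
    rw [← h0, outer_fold_eq allrhs allrhs.length 0 none (by omega) (by omega), List.drop_zero,
      foldB_pairs, max?_eq_foldl]
    have := foldl_stepB_max (pvPairs allrhs) none
    simpa using this
  show (match (PySem.List.pyRange 0 (PySem.List.len allrhs) 1).foldl (fun best i =>
      (PySem.List.pyRange (i + 1) (PySem.List.len allrhs) 1).foldl (fun best j =>
        stepB (PySem.List.pyGetD allrhs i "") (PySem.List.pyGetD allrhs j "") best) best)
      (none : Option (Int × (String × String) × String)) with
    | none => none
    | some b => some ([b.2.1.1, b.2.1.2], b.2.2)) = _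
  rw [hbest]
  cases PySem.List.max? (pvPairs allrhs) pvKey with
  | none => rfl
  | some m => rfl

-- ===== VERDICT (by name: the statement is the Claim_ definition above) =====
theorem getLongestPrefixMatch_spec : Claim_equal_getLongestPrefixMatch := by
  intro allrhs _
  unfold Spec_getLongestPrefixMatch
  rw [portA_eq, portB_eq]
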